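-- pv_equiv track=rewrite | github.com/ystefanova5/SoftUni-Python-Fundamentals | Past Exams/06. Programming Fundamentals Mid Exam Retake/task_02_treasure_hunt.py | steal
-- ===== SOURCE A (Python) =====
-- def steal(list_name, count):
--     stolen = []
--     if count >= len(list_name):
--         stolen = list_name.copy()
--         list_name.clear()
--     else:
--         for i in range(count):
--             stolen += [list_name.pop()]
--         stolen.reverse()
--     return list_name, stolen
-- ===== SOURCE B (Python) =====
-- def steal(list_name, count):
--     idx = len(list_name) - min(max(count, 0), len(list_name))
--     stolen = list_name[idx:]
--     list_name[:] = list_name[:idx]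
--     return list_name, stolen
-- ===== Notes on version B (the rewrite author's own statement) =====
-- stated objective: simpler
-- what changed: Replaced A's two branches (copy+clear vs a pop-and-append loop followed by a reverse) with a single closed-form slicing: idx = len - min(max(count,0), len), stolen = list[idx:], list[:] = list[:idx].
import Mathlib
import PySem

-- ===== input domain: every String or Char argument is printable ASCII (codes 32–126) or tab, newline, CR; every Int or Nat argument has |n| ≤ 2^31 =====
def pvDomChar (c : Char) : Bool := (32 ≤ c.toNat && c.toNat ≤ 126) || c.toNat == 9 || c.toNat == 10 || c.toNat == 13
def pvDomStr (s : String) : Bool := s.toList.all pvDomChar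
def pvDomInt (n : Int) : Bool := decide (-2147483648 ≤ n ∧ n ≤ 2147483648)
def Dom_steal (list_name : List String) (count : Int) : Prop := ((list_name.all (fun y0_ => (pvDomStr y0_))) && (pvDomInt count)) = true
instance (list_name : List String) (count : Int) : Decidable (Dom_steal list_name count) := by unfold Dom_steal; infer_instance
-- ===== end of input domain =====

-- B replaces A's two branches (copy+clear / pop-loop+reverse) with one closed-form
-- slicing at idx = len - min(max(count,0), len); both Pythons mutate list_name the
-- same way, the theorem is about the returned pair.


-- ===== PORT A =====
-- one loop step: stolen += [list_name.pop()]  (the 'none' arm is unreachable: the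
-- loop runs only when count < len(list_name), so the list is never empty there)
def stealStep (st : List String × List String) : List String × List String :=
  match PySem.List.pop? st.1 with
  | some (x, rest) => (rest, st.2 ++ [x])
  | none => st

def steal (list_name : List String) (count : Int) : List String × List String :=
  let stolen : List String := []
  if count ≥ (list_name.length : Int) then
    -- stolen = list_name.copy(); list_name.clear()
    (([] : List String), list_name)
  else
    let st := (PySem.List.pyRange 0 count 1).foldl (fun st _ => stealStep st) (list_name, stolen)
    (st.1, st.2.reverse)

-- ===== PORT B =====
def steal_alt (list_name : List String) (count : Int) : List String × List String :=
  let idx : Int := (list_name.length : Int) - min (max count 0) (list_name.length : Int)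
  let stolen := PySem.List.slice list_name (some idx) none
  (PySem.List.slice list_name none (some idx), stolen)

-- ===== PRECONDITION & SPEC =====
def Spec_steal (list_name : List String) (count : Int) (out : List String × List String) : Prop := out = steal_alt list_name count
instance (list_name : List String) (count : Int) (out : List String × List String) : Decidable (Spec_steal list_name count out) := by unfold Spec_steal; infer_instance

-- ===== CLAIM (what is proved, stated in full; the proofs are below) =====
def Claim_equal_steal : Prop := ∀ (list_name : List String) (count : Int), Dom_steal list_name count → Spec_steal list_name count (steal list_name count)

-- ===== LEMMAS AND PROOFS =====

-- a fold whose step ignores the element is an iterate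
lemma foldl_const_step {α β : Type} (f : β → β) (xs : List α) (b : β) :
    xs.foldl (fun b _ => f b) b = f^[xs.length] b := by
  induction xs generalizing b with
  | nil => rfl
  | cons x xs ih => simp [List.foldl, ih, Function.iterate_succ_apply]

-- c pops from the back leave the first (len - c) elements and accumulate the
-- popped suffix in reverse order
lemma iterate_stealStep (c : Nat) : ∀ (l s : List String), c ≤ l.length →
    stealStep^[c] (l, s) =
      (l.take (l.length - c), s ++ (l.drop (l.length - c)).reverse) := by
  induction c with
  | zero => intro l s _; simp
  | succ c ih =>
    intro l s hc
    have hne : l ≠ [] := by intro h; subst h; simp at hc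
    have hsplit : l.dropLast ++ [l.getLast hne] = l := List.dropLast_append_getLast hne
    have hlen : l.dropLast.length = l.length - 1 := @List.length_dropLast _ l
    have hstep : stealStep (l, s) = (l.dropLast, s ++ [l.getLast hne]) := by
      unfold stealStep
      conv_lhs => rw [← hsplit]
      rw [PySem.List.pop?_last]
    have h1 : l.dropLast.length - c = l.length - (c + 1) := by omega
    rw [Function.iterate_succ_apply, hstep,
        ih l.dropLast (s ++ [l.getLast hne]) (by omega), h1]
    refine Prod.ext ?_ ?_ <;> simp only []
    · rw [List.dropLast_eq_take, List.take_take]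
      congr 1
      omega
    · have hd : ∀ m, m ≤ l.dropLast.length →
          l.drop m = l.dropLast.drop m ++ [l.getLast hne] := by
        intro m hm
        conv_lhs => rw [← hsplit]
        exact List.drop_append_of_le_length hm
      rw [hd _ (by omega)]
      simp

theorem steal_spec : Claim_equal_steal := by
  intro l count _
  unfold Spec_steal steal steal_alt
  by_cases h : count ≥ (l.length : Int)
  · -- count >= len: A clears; B's idx = 0
    have hmax : max count 0 = count := by omega
    have hmin : min count (l.length : Int) = (l.length : Int) := by omega
    simp only [if_pos h, hmax, hmin, sub_self]
    rw [PySem.List.slice_to l (by omega), PySem.List.slice_from l (by omega)]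
    simp
  · -- count < len: the loop pops count.toNat elements off the back
    push Not at h
    have hc : count.toNat ≤ l.length := by omega
    have hidx : (l.length : Int) - min (max count 0) (l.length : Int) =
        ((l.length - count.toNat : Nat) : Int) := by omega
    simp only [if_neg (by omega : ¬ count ≥ (l.length : Int))]
    rw [foldl_const_step, PySem.List.length_pyRange_one]
    have : (count - 0).toNat = count.toNat := by omega
    rw [this, iterate_stealStep count.toNat l [] hc, hidx,
        PySem.List.slice_to l (by positivity), PySem.List.slice_from l (by positivity)]
    simp
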